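-- pv_equiv track=rewrite | github.com/appuk/rizza | rizza/helpers/misc.py | dictionary_exclusion
-- ===== SOURCE A (Python) =====
-- def dictionary_exclusion(indict=None, exclude=None):
--     """Remove any dictionary entries containing the specified string(s)."""
--     if exclude:
--         if not isinstance(exclude, list):
--             exclude = [exclude]
--         for exclusion in exclude:
--             exclusion = str(exclusion)
--             indict = {
--                 x: y for x, y
--                 in indict.items()
--                 if exclusion not in str(x)
--                 and exclusion not in str(y)
--             }
--     return indict
-- ===== SOURCE B (Python) =====
-- def dictionary_exclusion(indict=None, exclude=None):
--     """Remove any dictionary entries containing the specified string(s)."""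
--     if not exclude:
--         return indict
--     terms = exclude if isinstance(exclude, list) else [exclude]
--     out = {}
--     for x, y in indict.items():
--         if any(str(t) in str(x) or str(t) in str(y) for t in terms):
--             continue
--         out[x] = y
--     return out
-- ===== Notes on version B (the rewrite author's own statement) =====
-- stated objective: alternative
-- what changed: Replaces A's loop that rebuilds the whole dict once per exclusion term with a single accumulator pass over the items, skipping an entry as soon as any term occurs in its key or value.
import Mathlib
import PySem

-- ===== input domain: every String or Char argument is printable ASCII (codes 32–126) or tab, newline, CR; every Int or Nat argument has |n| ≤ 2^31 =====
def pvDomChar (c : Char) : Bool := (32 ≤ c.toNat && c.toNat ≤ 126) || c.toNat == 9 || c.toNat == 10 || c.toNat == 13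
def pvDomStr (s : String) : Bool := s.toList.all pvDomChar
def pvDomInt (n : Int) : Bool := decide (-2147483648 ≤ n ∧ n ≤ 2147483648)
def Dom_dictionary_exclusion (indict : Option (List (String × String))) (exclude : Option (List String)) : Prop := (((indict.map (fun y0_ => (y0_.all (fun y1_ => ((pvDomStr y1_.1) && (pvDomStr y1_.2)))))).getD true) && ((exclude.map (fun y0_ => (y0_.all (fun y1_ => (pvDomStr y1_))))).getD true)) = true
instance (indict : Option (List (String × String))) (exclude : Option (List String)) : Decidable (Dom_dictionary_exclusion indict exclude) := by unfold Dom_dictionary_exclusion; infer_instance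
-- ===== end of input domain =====

-- B replaces A's per-exclusion whole-dict rebuild loop with one accumulator pass over
-- the items that skips an entry as soon as any term occurs in its key or value.

-- ===== PORT A =====
-- A: if exclude truthy, loop over exclusions, each time rebuilding the dict keeping
-- entries where the exclusion is absent from key and value (str() is identity on str).
-- indict.items() on None raises AttributeError: Pre_ excludes that input.
def dictionary_exclusion (indict : Option (List (String × String))) (exclude : Option (List String)) : Option (List (String × String)) :=
  match exclude with
  | none => indict
  | some es =>
    if es.isEmpty then indict
    else
      es.foldl (fun d exclusion =>
        d.map (fun items =>
          items.filter (fun p =>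
            !(PySem.Str.isIn exclusion p.1) && !(PySem.Str.isIn exclusion p.2)))) indict

-- ===== PORT B =====
-- B's loop body: walk the items once, dropping an entry as soon as some term hits it
-- ('continue'), otherwise inserting it into the output (keys of a Python dict are
-- distinct, so successive inserts just append: the output is built back-to-front here).
def pvSieve (terms : List String) : List (String × String) → List (String × String)
  | [] => []
  | (x, y) :: rest =>
    if terms.any (fun t => PySem.Str.isIn t x || PySem.Str.isIn t y) then
      pvSieve terms rest
    else
      (x, y) :: pvSieve terms rest

def dictionary_exclusion_alt (indict : Option (List (String × String))) (exclude : Option (List String)) : Option (List (String × String)) :=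
  match exclude with
  | some (e :: es) => indict.map (pvSieve (e :: es))
  | _ => indict

-- ===== PRECONDITION & SPEC =====
-- Pre_ excludes exactly the inputs where A raises AttributeError: indict = None with a truthy exclude.
def Pre_dictionary_exclusion (indict : Option (List (String × String))) (exclude : Option (List String)) : Prop :=
  exclude.getD [] ≠ [] → indict ≠ none
instance (indict : Option (List (String × String))) (exclude : Option (List String)) : Decidable (Pre_dictionary_exclusion indict exclude) := by unfold Pre_dictionary_exclusion; infer_instance

def pvWitness_dictionary_exclusion : (Option (List (String × String))) × Option (List String) :=
  (some [("ax", "y"), ("q", "r")], some ["x"])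

def Spec_dictionary_exclusion (indict : Option (List (String × String))) (exclude : Option (List String)) (out : Option (List (String × String))) : Prop := out = dictionary_exclusion_alt indict exclude
instance (indict : Option (List (String × String))) (exclude : Option (List String)) (out : Option (List (String × String))) : Decidable (Spec_dictionary_exclusion indict exclude out) := by unfold Spec_dictionary_exclusion; infer_instance

-- ===== CLAIM (what is proved, stated in full; the proofs are below) =====
def Claim_equal_dictionary_exclusion : Prop := ∀ (indict : Option (List (String × String))) (exclude : Option (List String)), Dom_dictionary_exclusion indict exclude → Pre_dictionary_exclusion indict exclude → Spec_dictionary_exclusion indict exclude (dictionary_exclusion indict exclude)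

-- ===== LEMMAS AND PROOFS =====

-- folding successive filters equals one filter with the conjunction of the predicates
lemma foldl_filter_eq_filter_all {α β : Type} (p : α → β → Bool) :
    ∀ (es : List α) (l : List β),
      es.foldl (fun acc e => acc.filter (p e)) l = l.filter (fun x => es.all (fun e => p e x)) := by
  intro es
  induction es with
  | nil => intro l; simp
  | cons e es ih =>
    intro l
    simp only [List.foldl_cons, ih, List.filter_filter, List.all_cons]
    congr 1
    funext x
    exact Bool.and_comm _ _

-- B's single pass is the filter by "no term hits"
lemma pvSieve_eq_filter (terms : List String) :
    ∀ (l : List (String × String)),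
      pvSieve terms l
        = l.filter (fun p => !(terms.any (fun t => PySem.Str.isIn t p.1 || PySem.Str.isIn t p.2))) := by
  intro l
  induction l with
  | nil => rfl
  | cons p rest ih =>
    obtain ⟨x, y⟩ := p
    cases h : terms.any (fun t => PySem.Str.isIn t x || PySem.Str.isIn t y) with
    | true =>
      simp only [pvSieve, h, if_true, ih, List.filter_cons, Bool.not_true,
        Bool.false_eq_true, if_false]
    | false =>
      simp only [pvSieve, h, Bool.false_eq_true, if_false, ih, List.filter_cons,
        Bool.not_false, if_true]

theorem dictionary_exclusion_spec : Claim_equal_dictionary_exclusion := by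
  intro indict exclude _ hpre
  unfold Spec_dictionary_exclusion dictionary_exclusion dictionary_exclusion_alt
  cases exclude with
  | none => rfl
  | some es =>
    cases es with
    | nil => simp
    | cons e es' =>
      simp only [List.isEmpty_cons, Bool.false_eq_true, if_false]
      cases indict with
      | none => exact absurd rfl (hpre (by simp))
      | some items =>
        have h : ∀ (ys : List String) (d : List (String × String)),
            ys.foldl (fun (d : Option (List (String × String))) exclusion =>
              d.map (fun items => items.filter (fun p =>
                !(PySem.Str.isIn exclusion p.1) && !(PySem.Str.isIn exclusion p.2)))) (some d)
            = some (ys.foldl (fun acc exclusion => acc.filter (fun p =>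
                !(PySem.Str.isIn exclusion p.1) && !(PySem.Str.isIn exclusion p.2))) d) := by
          intro ys
          induction ys with
          | nil => intro d; rfl
          | cons y ys ih => intro d; simpa using ih _
        rw [h, foldl_filter_eq_filter_all]
        simp only [Option.map_some, pvSieve_eq_filter]
        congr 1
        apply List.filter_congr
        intro p _
        simp [List.all_eq_not_any_not]
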